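-- pv_equiv track=rewrite | github.com/waleedlugod/CSCI30 | pset4/wings.py | arrange_wings
-- ===== SOURCE A (Python) =====
-- class Vertex:
--     def __init__(self, label):
--         self.label: str = label
--         self.neighbors: list[Vertex] = []
--         self.visited = False
--
--     def addNeighbor(self, vertex):
--         self.neighbors.append(vertex)
--
-- def TopoDFS(graph: dict[str, Vertex], wing: Vertex, order: list[str]):
--     wing.visited = True
--     for neighbor in wing.neighbors:
--         if not neighbor.visited: TopoDFS(graph, neighbor, order)
--     order.append(wing.label)
--     return
--
-- def check_ordering(obs, ordering):
--     # assign index to each vertex in `ordering`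
--     index = {ordering[i]: i for i in range(len(ordering))}
--
--     valid = True
--     for (u, v) in obs:
--         valid = valid and index[u] < index[v]
--     return ordering if valid else None
--
-- def arrange_wings(wings: list[str], obs: list[tuple[str, str]]):
--     obsGraph = {wings[i]: Vertex(wings[i]) for i in range(len(wings))}
--     for ob in obs:
--         obsGraph[ob[0]].addNeighbor(obsGraph[ob[1]])
--     order = []
--     for wing in obsGraph.values():
--         if not wing.visited: TopoDFS(obsGraph, wing, order)
--     return check_ordering(obs, order[::-1])
-- ===== SOURCE B (Python) =====
-- def arrange_wings(wings: list[str], obs: list[tuple[str, str]]):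
--     # iterative (explicit-stack) DFS instead of recursion; plain dict adjacency instead of Vertex objects
--     adj = {w: [] for w in wings}
--     for u, v in obs:
--         adj[u].append(v)
--     visited = set()
--     order = []
--     for w in adj:
--         if w in visited:
--             continue
--         visited.add(w)
--         stack = [(w, adj[w])]
--         while stack:
--             lbl, ns = stack.pop()
--             if not ns:
--                 order.append(lbl)
--             else:
--                 n, rest = ns[0], ns[1:]
--                 stack.append((lbl, rest))
--                 if n not in visited:
--                     visited.add(n)
--                     stack.append((n, adj[n]))
--     order.reverse()
--     pos = {lbl: i for i, lbl in enumerate(order)}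
--     if all(pos[u] < pos[v] for u, v in obs):
--         return order
--     return None
-- ===== Notes on version B (the rewrite author's own statement) =====
-- stated objective: alternative
-- what changed: The recursive Vertex-object DFS (mutable class instances, recursion, mutated global order list) is replaced by an iterative explicit-stack DFS over a plain dict adjacency list with a visited set, producing the same post-order; validation uses enumerate and all() instead of an index-building range loop and a boolean fold.
import Mathlib
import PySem

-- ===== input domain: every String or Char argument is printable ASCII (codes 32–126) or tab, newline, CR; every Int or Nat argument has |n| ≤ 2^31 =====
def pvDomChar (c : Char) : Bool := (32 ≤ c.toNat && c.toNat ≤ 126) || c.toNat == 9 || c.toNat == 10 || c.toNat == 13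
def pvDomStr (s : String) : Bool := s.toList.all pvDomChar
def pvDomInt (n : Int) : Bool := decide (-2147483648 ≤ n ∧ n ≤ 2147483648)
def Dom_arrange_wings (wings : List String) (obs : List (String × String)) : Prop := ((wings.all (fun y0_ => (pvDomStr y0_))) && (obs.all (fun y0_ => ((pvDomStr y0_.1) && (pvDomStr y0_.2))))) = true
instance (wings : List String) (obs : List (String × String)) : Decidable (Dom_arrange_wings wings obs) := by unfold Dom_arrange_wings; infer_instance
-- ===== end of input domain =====

-- B replaces A's recursive Vertex-object DFS by an explicit-stack iterative DFS over a plain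
-- adjacency dict (same post-order, same validation); objective: alternative (no speed claim).

-- ===== PORT A =====
-- graph build: {wings[i]: Vertex(wings[i])}, then obsGraph[ob[0]].addNeighbor(obsGraph[ob[1]])
-- (a KeyError on a missing endpoint is excluded by Pre_; the port skips such a pair)
def buildGraphA (wings : List String) (obs : List (String × String)) :
    PySem.Dict String (List String) :=
  let g := wings.foldl (fun d w => d.insert w ([] : List String)) PySem.Dict.empty
  obs.foldl (fun d p =>
    match d.get? p.1, d.get? p.2 with
    | some ns, some _ => d.insert p.1 (ns ++ [p.2])
    | _, _ => d) g

-- TopoDFS: recursion made total by a fuel argument (#keys suffices, proved below);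
-- state = (visited labels, order); neighbors are looked up by label (labels are unique keys)
mutual
def dfsA (g : PySem.Dict String (List String)) (f : Nat) (lbl : String)
    (st : List String × List String) : List String × List String :=
  match f with
  | 0 => st
  | Nat.succ f' =>
    match g.get? lbl with
    | none => st
    | some ns =>
      let st' := dfsL g f' ns (lbl :: st.1, st.2)
      (st'.1, st'.2 ++ [lbl])
termination_by (f, 0)
decreasing_by apply Prod.Lex.left; omega

def dfsL (g : PySem.Dict String (List String)) (f : Nat) (ns : List String)
    (st : List String × List String) : List String × List String :=
  match ns with
  | [] => st
  | n :: ns' => dfsL g f ns' (if st.1.contains n then st else dfsA g f n st)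
termination_by (f, ns.length + 1)
decreasing_by
  · apply Prod.Lex.right; omega
  · apply Prod.Lex.right; simp
end

-- check_ordering
def checkOrderingA (obs : List (String × String)) (ordering : List String) :
    Option (List String) :=
  let index := (PySem.List.pyRange 0 (ordering.length : Int) 1).foldl
    (fun d i =>
      match PySem.List.pyGet? ordering i with
      | some x => d.insert x i
      | none => d) PySem.Dict.empty
  let valid := obs.foldl (fun v p =>
    v && (match index.get? p.1, index.get? p.2 with
          | some a, some b => decide (a < b)
          | _, _ => false)) true
  if valid then some ordering else none

def arrange_wings (wings : List String) (obs : List (String × String)) :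
    Option (List String) :=
  let g := buildGraphA wings obs
  let st := g.items.foldl
    (fun st p => if st.1.contains p.1 then st else dfsA g g.size p.1 st)
    (([], []) : List String × List String)
  checkOrderingA obs st.2.reverse   -- order[::-1]

-- ===== PORT B =====
-- adj = {w: [] for w in wings}; adj[u].append(v)  (KeyError on missing u excluded by Pre_)
def buildGraphB (wings : List String) (obs : List (String × String)) :
    PySem.Dict String (List String) :=
  let g := wings.foldl (fun d w => d.insert w ([] : List String)) PySem.Dict.empty
  obs.foldl (fun d p =>
    match d.get? p.1 with
    | some ns => d.insert p.1 (ns ++ [p.2])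
    | none => d) g

-- number of keys not yet visited (termination measure of the stack loop)
def cUnv (keys vis : List String) : Nat := (keys.filter (fun x => !vis.contains x)).length

def stackSize (stack : List (String × List String)) : Nat :=
  (stack.map (fun p => p.2.length + 1)).sum

theorem cUnv_cons_lt (keys vis : List String) (n : String) (hmem : n ∈ keys)
    (hnv : vis.contains n = false) : cUnv keys (n :: vis) < cUnv keys vis := by
  have hsub := List.monotone_filter_right keys
    (p := fun x => !(n :: vis).contains x) (q := fun x => !vis.contains x)
    (by intro a ha; simp at ha ⊢; exact ha.2)
  have hmem1 : n ∈ keys.filter (fun x => !vis.contains x) :=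
    List.mem_filter.mpr ⟨hmem, by simpa using hnv⟩
  have hmem2 : n ∉ keys.filter (fun x => !(n :: vis).contains x) := by
    simp [List.mem_filter]
  have hne : keys.filter (fun x => !(n :: vis).contains x) ≠
      keys.filter (fun x => !vis.contains x) := by
    intro h; rw [h] at hmem2; exact hmem2 hmem1
  exact Nat.lt_of_le_of_ne hsub.length_le (fun h => hne (hsub.eq_of_length h))

theorem mem_keys_of_get?_isSome {g : PySem.Dict String (List String)} {n : String}
    {v : List String} (h : g.get? n = some v) : n ∈ g.keys := by
  have hc : g.contains n = true := by rw [PySem.Dict.contains_eq_isSome_get?, h]; rfl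
  exact (PySem.Dict.contains_iff_mem_keys _ _).mp hc

-- the explicit-stack DFS loop; frames are (label, remaining neighbours)
def runB (g : PySem.Dict String (List String)) (stack : List (String × List String))
    (vis ord : List String) : List String × List String :=
  match stack with
  | [] => (vis, ord)
  | (lbl, []) :: rest => runB g rest vis (ord ++ [lbl])
  | (lbl, n :: ns) :: rest =>
    if hv : vis.contains n then runB g ((lbl, ns) :: rest) vis ord
    else
      match hget : g.get? n with
      | some adjn => runB g ((n, adjn) :: (lbl, ns) :: rest) (n :: vis) ord
      | none => (vis, ord)   -- Python KeyError (missing key); outside Pre_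
termination_by (cUnv g.keys vis, stackSize stack)
decreasing_by
  · apply Prod.Lex.right; simp [stackSize]
  · apply Prod.Lex.right; simp [stackSize]
  · apply Prod.Lex.left
    exact cUnv_cons_lt _ _ _ (mem_keys_of_get?_isSome hget) (by simpa using hv)

def arrange_wings_alt (wings : List String) (obs : List (String × String)) :
    Option (List String) :=
  let g := buildGraphB wings obs
  let st := g.items.foldl
    (fun st p =>
      if st.1.contains p.1 then st
      else runB g [(p.1, g.getD p.1 [])] (p.1 :: st.1) st.2)
    (([], []) : List String × List String)
  let order := st.2.reverse
  let pos := (PySem.List.enumerate order 0).foldl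
    (fun d p => d.insert p.2 p.1) PySem.Dict.empty
  if obs.all (fun p =>
      match pos.get? p.1, pos.get? p.2 with
      | some a, some b => decide (a < b)
      | _, _ => false)
  then some order else none

-- ===== PRECONDITION & SPEC =====
-- Pre_ excludes exactly the inputs where A raises KeyError: an observation endpoint not in wings.
def Pre_arrange_wings (wings : List String) (obs : List (String × String)) : Prop :=
  ∀ p ∈ obs, p.1 ∈ wings ∧ p.2 ∈ wings
instance (wings : List String) (obs : List (String × String)) : Decidable (Pre_arrange_wings wings obs) := by unfold Pre_arrange_wings; infer_instance

def pvWitness_arrange_wings : List String × (List (String × String)) :=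
  (["a", "b", "c"], [("a", "b"), ("b", "c")])

def Spec_arrange_wings (wings : List String) (obs : List (String × String)) (out : Option (List String)) : Prop := out = arrange_wings_alt wings obs
instance (wings : List String) (obs : List (String × String)) (out : Option (List String)) : Decidable (Spec_arrange_wings wings obs out) := by unfold Spec_arrange_wings; infer_instance

-- ===== CLAIM (what is proved, stated in full; the proofs are below) =====
def Claim_equal_arrange_wings : Prop := ∀ (wings : List String) (obs : List (String × String)), Dom_arrange_wings wings obs → Pre_arrange_wings wings obs → Spec_arrange_wings wings obs (arrange_wings wings obs)

-- ===== LEMMAS AND PROOFS =====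

-- visited labels only grow through the recursive DFS
theorem dfs_mono (g : PySem.Dict String (List String)) (f : Nat) :
    (∀ lbl st x, x ∈ st.1 → x ∈ (dfsA g f lbl st).1) ∧
    (∀ ns st x, x ∈ st.1 → x ∈ (dfsL g f ns st).1) := by
  induction f using Nat.strong_induction_on with
  | _ f IH =>
    have ha : ∀ lbl st x, x ∈ st.1 → x ∈ (dfsA g f lbl st).1 := by
      intro lbl st x hx
      cases f with
      | zero => simpa [dfsA] using hx
      | succ f' =>
        rw [dfsA]
        cases hg : g.get? lbl with
        | none => simpa using hx
        | some ns =>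
          simp only []
          exact (IH f' (Nat.lt_succ_self f')).2 ns (lbl :: st.1, st.2) x
            (List.mem_cons_of_mem _ hx)
    refine ⟨ha, ?_⟩
    intro ns
    induction ns with
    | nil => intro st x hx; simpa [dfsL] using hx
    | cons n ns' ihn =>
      intro st x hx
      rw [dfsL]
      apply ihn
      by_cases hc : n ∈ st.1
      · simpa [hc] using hx
      · simp only [List.contains_eq_mem, hc, decide_false, Bool.false_eq_true, if_false]
        exact ha n st x hx

-- reduction equations for the stack loop
theorem runB_nil (g : PySem.Dict String (List String)) (vis ord : List String) :
    runB g [] vis ord = (vis, ord) := by rw [runB]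

theorem runB_pop (g : PySem.Dict String (List String)) (lbl : String)
    (rest : List (String × List String)) (vis ord : List String) :
    runB g ((lbl, []) :: rest) vis ord = runB g rest vis (ord ++ [lbl]) := by rw [runB]

theorem runB_skip (g : PySem.Dict String (List String)) (lbl n : String)
    (ns : List String) (rest : List (String × List String)) (vis ord : List String)
    (hv : vis.contains n = true) :
    runB g ((lbl, n :: ns) :: rest) vis ord = runB g ((lbl, ns) :: rest) vis ord := by
  rw [runB, dif_pos hv]

theorem runB_push (g : PySem.Dict String (List String)) (lbl n : String)
    (ns adjn : List String) (rest : List (String × List String)) (vis ord : List String)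
    (hv : vis.contains n = false) (hget : g.get? n = some adjn) :
    runB g ((lbl, n :: ns) :: rest) vis ord =
      runB g ((n, adjn) :: (lbl, ns) :: rest) (n :: vis) ord := by
  have hv' : n ∉ vis := by simpa using hv
  rw [runB, dif_neg (by simpa using hv')]
  split
  · next a h => rw [hget] at h; cases h; rfl
  · next h => rw [hget] at h; cases h

theorem cUnv_mono (keys vis vis' : List String) (h : ∀ x ∈ vis, x ∈ vis') :
    cUnv keys vis' ≤ cUnv keys vis := by
  have hsub := List.monotone_filter_right keys
    (p := fun x => !vis'.contains x) (q := fun x => !vis.contains x)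
    (by intro a ha; simp at ha ⊢; intro hm; exact ha (h a hm))
  simpa [cUnv] using hsub.length_le

-- the stack loop simulates the recursive DFS frame by frame
theorem runB_sim (g : PySem.Dict String (List String))
    (Hclo : ∀ l ls, g.get? l = some ls → ∀ n ∈ ls, (g.get? n).isSome = true) :
    ∀ cv sz (stack : List (String × List String)) (vis ord : List String)
      (lbl : String) (ns : List String) (rest : List (String × List String)) (f : Nat),
      cv = cUnv g.keys vis → sz = stackSize stack → stack = (lbl, ns) :: rest →
      (∀ p ∈ stack, ∀ n ∈ p.2, (g.get? n).isSome = true) →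
      cUnv g.keys vis ≤ f →
      runB g stack vis ord =
        runB g rest (dfsL g f ns (vis, ord)).1 ((dfsL g f ns (vis, ord)).2 ++ [lbl]) := by
  intro cv
  induction cv using Nat.strong_induction_on with
  | _ cv IHc =>
  intro sz
  induction sz using Nat.strong_induction_on with
  | _ sz IHs =>
  intro stack vis ord lbl ns rest f hcv hsz hstack Hst Hf
  subst hstack
  cases ns with
  | nil => rw [runB_pop, dfsL]
  | cons n ns' =>
    by_cases hv : vis.contains n
    · -- neighbour already visited: both sides skip it
      have hv' : n ∈ vis := by simpa using hv
      have hd : dfsL g f (n :: ns') (vis, ord) = dfsL g f ns' (vis, ord) := by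
        rw [dfsL]; simp [hv']
      rw [runB_skip g lbl n ns' rest vis ord hv, hd]
      exact IHs (stackSize ((lbl, ns') :: rest))
        (by subst hsz; simp [stackSize]) ((lbl, ns') :: rest) vis ord lbl ns' rest f
        hcv rfl rfl
        (by intro p hp m hm
            rcases List.mem_cons.mp hp with hp | hp
            · subst hp; exact Hst (lbl, n :: ns') (by simp) m (by simp [hm])
            · exact Hst p (by simp [hp]) m hm)
        Hf
    · -- unvisited neighbour: the loop descends into it
      have hvf : vis.contains n = false := by simpa using hv
      have hsome : (g.get? n).isSome = true :=
        Hst (lbl, n :: ns') (by simp) n (by simp)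
      obtain ⟨adjn, hget⟩ : ∃ a, g.get? n = some a := by
        cases h : g.get? n with
        | none => rw [h] at hsome; cases hsome
        | some a => exact ⟨a, rfl⟩
      have hmemn : n ∈ g.keys := mem_keys_of_get?_isSome hget
      have hclt : cUnv g.keys (n :: vis) < cUnv g.keys vis := cUnv_cons_lt _ _ _ hmemn hvf
      obtain ⟨f', rfl⟩ : ∃ f', f = f' + 1 := ⟨f - 1, by omega⟩
      have hfn : cUnv g.keys (n :: vis) ≤ f' := by omega
      have Hst2 : ∀ p ∈ (n, adjn) :: (lbl, ns') :: rest, ∀ m ∈ p.2, (g.get? m).isSome = true := by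
        intro p hp m hm
        rcases List.mem_cons.mp hp with hp | hp
        · subst hp; exact Hclo n adjn hget m hm
        rcases List.mem_cons.mp hp with hp | hp
        · subst hp; exact Hst (lbl, n :: ns') (by simp) m (by simp [hm])
        · exact Hst p (by simp [hp]) m hm
      have ih1 := IHc (cUnv g.keys (n :: vis)) (by omega)
        (stackSize ((n, adjn) :: (lbl, ns') :: rest)) ((n, adjn) :: (lbl, ns') :: rest)
        (n :: vis) ord n adjn ((lbl, ns') :: rest) f' rfl rfl rfl Hst2 hfn
      rw [runB_push g lbl n ns' adjn rest vis ord hvf hget, ih1]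
      have hA : dfsA g (f' + 1) n (vis, ord) =
          ((dfsL g f' adjn (n :: vis, ord)).1, (dfsL g f' adjn (n :: vis, ord)).2 ++ [n]) := by
        rw [dfsA]; simp [hget]
      have hmono : ∀ x ∈ (n :: vis), x ∈ (dfsL g f' adjn (n :: vis, ord)).1 :=
        fun x hx => (dfs_mono g f').2 adjn (n :: vis, ord) x hx
      have hcle : cUnv g.keys (dfsL g f' adjn (n :: vis, ord)).1 ≤ cUnv g.keys (n :: vis) :=
        cUnv_mono _ _ _ hmono
      have ih2 := IHc (cUnv g.keys (dfsL g f' adjn (n :: vis, ord)).1) (by omega)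
        (stackSize ((lbl, ns') :: rest)) ((lbl, ns') :: rest)
        (dfsL g f' adjn (n :: vis, ord)).1 ((dfsL g f' adjn (n :: vis, ord)).2 ++ [n])
        lbl ns' rest (f' + 1) rfl rfl rfl
        (by intro p hp m hm
            rcases List.mem_cons.mp hp with hp | hp
            · subst hp; exact Hst (lbl, n :: ns') (by simp) m (by simp [hm])
            · exact Hst p (by simp [hp]) m hm)
        (by omega)
      rw [ih2]
      have hd : dfsL g (f' + 1) (n :: ns') (vis, ord) =
          dfsL g (f' + 1) ns' ((dfsL g f' adjn (n :: vis, ord)).1,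
            (dfsL g f' adjn (n :: vis, ord)).2 ++ [n]) := by
        rw [dfsL]
        simp only [hvf, Bool.false_eq_true, if_false, hA]
      rw [hd]

-- insert never removes a key
theorem isSome_get?_insert (d : PySem.Dict String (List String)) (k w : String)
    (v : List String) (h : ((d.get? w).isSome) = true) :
    (((d.insert k v).get? w).isSome) = true := by
  rw [PySem.Dict.get?_insert]
  split
  · rfl
  · exact h

-- the initial dict has exactly the wings as keys
theorem keys_init (wings : List String) :
    ((wings.foldl (fun d w => d.insert w ([] : List String)) PySem.Dict.empty)).keys =
      PySem.Set.ofList wings := by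
  have h := PySem.Dict.keys_foldl_insert wings (fun _ _ => ([] : List String)) PySem.Dict.empty
  simpa [PySem.Dict.keys_empty, PySem.Set.update_nil_left] using h

theorem isSome_init (wings : List String) (w : String) (hw : w ∈ wings) :
    (((wings.foldl (fun d w => d.insert w ([] : List String)) PySem.Dict.empty)).get? w).isSome = true := by
  rw [← PySem.Dict.contains_eq_isSome_get?]
  exact (PySem.Dict.contains_iff_mem_keys _ _).mpr
    (by rw [keys_init]; exact (PySem.Set.mem_ofList _ _).mpr hw)

-- both builds create the same dict when every endpoint is a wing
theorem edges_eq (obs : List (String × String)) (d : PySem.Dict String (List String))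
    (H : ∀ p ∈ obs, ((d.get? p.1).isSome) = true ∧ ((d.get? p.2).isSome) = true) :
    obs.foldl (fun d p =>
      match d.get? p.1 with
      | some ns => d.insert p.1 (ns ++ [p.2])
      | none => d) d =
    obs.foldl (fun d p =>
      match d.get? p.1, d.get? p.2 with
      | some ns, some _ => d.insert p.1 (ns ++ [p.2])
      | _, _ => d) d := by
  induction obs generalizing d with
  | nil => rfl
  | cons p obs' ih =>
    obtain ⟨h1, h2⟩ := H p (by simp)
    obtain ⟨ns1, hp1⟩ : ∃ a, d.get? p.1 = some a := by
      cases h : d.get? p.1 with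
      | none => rw [h] at h1; cases h1
      | some a => exact ⟨a, rfl⟩
    obtain ⟨ns2, hp2⟩ : ∃ a, d.get? p.2 = some a := by
      cases h : d.get? p.2 with
      | none => rw [h] at h2; cases h2
      | some a => exact ⟨a, rfl⟩
    simp only [List.foldl_cons, hp1, hp2]
    exact ih _ (by
      intro q hq
      obtain ⟨hq1, hq2⟩ := H q (by simp [hq])
      exact ⟨isSome_get?_insert _ _ _ _ hq1, isSome_get?_insert _ _ _ _ hq2⟩)

theorem build_eq (wings : List String) (obs : List (String × String))
    (hpre : Pre_arrange_wings wings obs) : buildGraphB wings obs = buildGraphA wings obs := by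
  unfold buildGraphB buildGraphA
  exact edges_eq obs _ (fun p hp =>
    ⟨isSome_init wings p.1 (hpre p hp).1, isSome_init wings p.2 (hpre p hp).2⟩)

theorem keys_edges (obs : List (String × String)) (d : PySem.Dict String (List String)) :
    (obs.foldl (fun d p =>
      match d.get? p.1, d.get? p.2 with
      | some ns, some _ => d.insert p.1 (ns ++ [p.2])
      | _, _ => d) d).keys = d.keys := by
  induction obs generalizing d with
  | nil => rfl
  | cons p obs' ih =>
    simp only [List.foldl_cons]
    rw [ih]
    cases h1 : d.get? p.1 with
    | none => rfl
    | some ns =>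
      cases h2 : d.get? p.2 with
      | none => rfl
      | some _ =>
        exact PySem.Dict.keys_insert_of_contains d _ (by
          rw [PySem.Dict.contains_eq_isSome_get?, h1]; rfl)

theorem keys_buildA (wings : List String) (obs : List (String × String)) :
    (buildGraphA wings obs).keys = PySem.Set.ofList wings := by
  unfold buildGraphA
  rw [keys_edges, keys_init]

theorem values_init (wings : List String) :
    ∀ l ls, ((wings.foldl (fun d w => d.insert w ([] : List String)) PySem.Dict.empty)).get? l = some ls →
      ls = [] := by
  have : ∀ (ws : List String) (d : PySem.Dict String (List String)),
      (∀ l ls, d.get? l = some ls → ls = []) →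
      ∀ l ls, (ws.foldl (fun d w => d.insert w ([] : List String)) d).get? l = some ls → ls = [] := by
    intro ws
    induction ws with
    | nil => intro d h; exact h
    | cons w ws' ih =>
      intro d h
      simp only [List.foldl_cons]
      refine ih _ ?_
      intro l ls hl
      rw [PySem.Dict.get?_insert] at hl
      split at hl
      · cases hl; rfl
      · exact h l ls hl
  exact this wings PySem.Dict.empty (by intro l ls h; rw [PySem.Dict.get?_empty] at h; cases h)

theorem closure_buildA (wings : List String) (obs : List (String × String)) :
    ∀ l ls, (buildGraphA wings obs).get? l = some ls →
      ∀ n ∈ ls, ((buildGraphA wings obs).get? n).isSome = true := by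
  unfold buildGraphA
  have main : ∀ (os : List (String × String)) (d : PySem.Dict String (List String)),
      (∀ l ls, d.get? l = some ls → ∀ n ∈ ls, ((d.get? n).isSome) = true) →
      ∀ l ls, (os.foldl (fun d p =>
        match d.get? p.1, d.get? p.2 with
        | some ns, some _ => d.insert p.1 (ns ++ [p.2])
        | _, _ => d) d).get? l = some ls →
        ∀ n ∈ ls, (((os.foldl (fun d p =>
        match d.get? p.1, d.get? p.2 with
        | some ns, some _ => d.insert p.1 (ns ++ [p.2])
        | _, _ => d) d)).get? n).isSome = true := by
    intro os
    induction os with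
    | nil => intro d h; exact h
    | cons p os' ih =>
      intro d h
      simp only [List.foldl_cons]
      cases h1 : d.get? p.1 with
      | none => exact ih d h
      | some ns1 =>
        cases h2 : d.get? p.2 with
        | none => exact ih d h
        | some ns2 =>
          refine ih _ ?_
          intro l ls hl n hn
          rw [PySem.Dict.get?_insert] at hl
          split at hl
          · cases hl
            rcases List.mem_append.mp hn with hn | hn
            · exact isSome_get?_insert _ _ _ _ (h p.1 ns1 h1 n hn)
            · have : n = p.2 := by simpa using hn
              subst this
              exact isSome_get?_insert _ _ _ _ (by rw [h2]; rfl)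
          · exact isSome_get?_insert _ _ _ _ (h l ls hl n hn)
  intro l ls hl
  exact main obs _ (by
    intro l' ls' hl'
    have := values_init wings l' ls' hl'
    subst this
    intro n hn
    cases hn) l ls hl

-- the two index dictionaries coincide
theorem index_dict_eq (l : List String) :
    (PySem.List.pyRange 0 (l.length : Int) 1).foldl
      (fun d i =>
        match PySem.List.pyGet? l i with
        | some x => d.insert x i
        | none => d) PySem.Dict.empty =
    (PySem.List.enumerate l 0).foldl
      (fun d p => d.insert p.2 p.1) (PySem.Dict.empty : PySem.Dict String Int) := by
  have he := PySem.List.enumerate_eq_map_pyRange l ""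
  rw [show PySem.List.enumerate l 0 = PySem.List.enumerate l from rfl, he,
    List.foldl_map]
  refine PySem.List.foldl_congr_mem _ _ _ _ ?_
  intro acc x hx
  obtain ⟨hx0, hxl⟩ := PySem.List.mem_pyRange_one.mp hx
  obtain ⟨n, rfl⟩ : ∃ n : Nat, x = (n : Int) := ⟨x.toNat, (Int.toNat_of_nonneg hx0).symm⟩
  have hlt : n < l.length := by exact_mod_cast hxl
  rw [PySem.List.pyGet?_natCast, List.getElem?_eq_getElem hlt, PySem.List.pyGetD_natCast,
    List.getD_eq_getElem _ _ hlt]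

theorem foldl_and_eq_all {α : Type} (l : List α) (p : α → Bool) (b : Bool) :
    l.foldl (fun v x => v && p x) b = (b && l.all p) := by
  induction l generalizing b with
  | nil => simp
  | cons x xs ih => simp [List.foldl_cons, ih, Bool.and_assoc]

-- one outer-loop step: recursive DFS from an unvisited key = stack DFS from it
theorem step_eq (g : PySem.Dict String (List String))
    (Hclo : ∀ l ls, g.get? l = some ls → ∀ n ∈ ls, (g.get? n).isSome = true)
    (hnodup : g.keys.Nodup) (k : String) (v : List String) (hp : (k, v) ∈ g.items)
    (st : List String × List String) (hc : st.1.contains k = false) :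
    dfsA g g.size k st = runB g [(k, g.getD k [])] (k :: st.1) st.2 := by
  have hget : g.get? k = some v := PySem.Dict.get?_of_mem_items g hp hnodup
  have hgetD : g.getD k [] = v := PySem.Dict.getD_of_mem_items g hp hnodup []
  have hmemk : k ∈ g.keys := mem_keys_of_get?_isSome hget
  have hkeyslen : g.keys.length = g.size := by
    simp [PySem.Dict.keys, PySem.Dict.size]
  have hb : cUnv g.keys st.1 ≤ g.size := by
    rw [← hkeyslen]; exact List.length_filter_le _ _
  have hlt : cUnv g.keys (k :: st.1) < cUnv g.keys st.1 := cUnv_cons_lt _ _ _ hmemk hc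
  obtain ⟨f', hf⟩ : ∃ f', g.size = f' + 1 := ⟨g.size - 1, by omega⟩
  rw [hf, hgetD]
  rw [runB_sim g Hclo (cUnv g.keys (k :: st.1)) (stackSize [(k, v)]) [(k, v)]
    (k :: st.1) st.2 k v [] f' rfl rfl rfl
    (by intro q hq m hm
        have : q = (k, v) := by simpa using hq
        subst this
        exact Hclo k v hget m hm)
    (by omega)]
  rw [runB_nil, dfsA]
  simp [hget]

-- ===== VERDICT (by name: the statement is the Claim_ definition above) =====
theorem arrange_wings_spec : Claim_equal_arrange_wings := by
  unfold Claim_equal_arrange_wings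
  intro wings obs hdom hpre
  unfold Spec_arrange_wings
  simp only [arrange_wings, arrange_wings_alt]
  rw [build_eq wings obs hpre]
  have hnodup : (buildGraphA wings obs).keys.Nodup := by
    rw [keys_buildA]; exact PySem.Set.nodup_ofList _
  have Hclo := closure_buildA wings obs
  set g := buildGraphA wings obs with hg
  have hfold : ∀ (l : List (String × List String)) (st : List String × List String),
      (∀ p ∈ l, p ∈ g.items) →
      l.foldl (fun st p => if st.1.contains p.1 then st else dfsA g g.size p.1 st) st =
      l.foldl (fun st p => if st.1.contains p.1 then st
        else runB g [(p.1, g.getD p.1 [])] (p.1 :: st.1) st.2) st := by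
    intro l
    induction l with
    | nil => intro st _; rfl
    | cons p l' ih =>
      intro st hmem
      simp only [List.foldl_cons]
      have hstep : (if st.1.contains p.1 then st else dfsA g g.size p.1 st) =
          (if st.1.contains p.1 then st
           else runB g [(p.1, g.getD p.1 [])] (p.1 :: st.1) st.2) := by
        by_cases hc : p.1 ∈ st.1
        · simp [hc]
        · have hcf : st.1.contains p.1 = false := by simpa using hc
          simp only [hcf, Bool.false_eq_true, if_false]
          exact step_eq g Hclo hnodup p.1 p.2 (by simpa using hmem p (by simp)) st hcf
      rw [hstep]
      exact ih _ (fun q hq => hmem q (by simp [hq]))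
  rw [hfold g.items ([], []) (fun p hp => hp)]
  rw [checkOrderingA]
  rw [index_dict_eq]
  rw [foldl_and_eq_all]
  simp only [Bool.true_and]
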